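-- pv_equiv track=rewrite | github.com/thuva4/Algorithms | algorithms/trees/trie/python/trie_insert_search.py | trie_insert_search
-- ===== SOURCE A (Python) =====
-- class TrieNode:
--     def __init__(self) -> None:
--         self.children: dict[str, TrieNode] = {}
--         self.is_end: bool = False
--
-- def _insert(root: TrieNode, key: int) -> None:
--     node = root
--     for ch in str(key):
--         if ch not in node.children:
--             node.children[ch] = TrieNode()
--         node = node.children[ch]
--     node.is_end = True
--
-- def _search(root: TrieNode, key: int) -> bool:
--     node = root
--     for ch in str(key):
--         if ch not in node.children:
--             return False
--         node = node.children[ch]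
--     return node.is_end
--
-- def trie_insert_search(arr: list[int]) -> int:
--     n = len(arr)
--     mid = n // 2
--     root = TrieNode()
--
--     for i in range(mid):
--         _insert(root, arr[i])
--
--     count = 0
--     for i in range(mid, n):
--         if _search(root, arr[i]):
--             count += 1
--
--     return count
-- ===== SOURCE B (Python) =====
-- def trie_insert_search(arr: list[int]) -> int:
--     mid = len(arr) // 2
--     first = set(arr[:mid])
--     return sum(1 for x in arr[mid:] if x in first)
-- ===== Notes on version B (the rewrite author's own statement) =====
-- stated objective: faster
-- what changed: Replaced the digit-trie (TrieNode class, per-character insert/search loops) by a hash set of the first-half values and a one-line count over the second half; str-injectivity on ints makes exact trie membership equal to set membership.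
import Mathlib
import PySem

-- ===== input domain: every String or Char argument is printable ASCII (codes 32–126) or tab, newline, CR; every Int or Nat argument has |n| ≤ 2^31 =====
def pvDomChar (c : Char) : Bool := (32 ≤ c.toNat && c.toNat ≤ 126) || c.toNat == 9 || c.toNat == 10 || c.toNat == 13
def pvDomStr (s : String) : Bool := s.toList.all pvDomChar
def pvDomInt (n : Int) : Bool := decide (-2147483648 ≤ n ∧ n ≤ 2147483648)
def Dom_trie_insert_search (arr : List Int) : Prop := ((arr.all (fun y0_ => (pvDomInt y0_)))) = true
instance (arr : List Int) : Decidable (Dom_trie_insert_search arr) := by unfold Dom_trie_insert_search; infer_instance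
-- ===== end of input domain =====

-- B replaces A's digit-trie by a set of the whole first-half values and a one-line count: simpler.

-- ===== PORT A =====
-- TrieNode = (children dict, is_end). The child dict is encoded as an explicit
-- association sequence Ch with the child node's two fields inlined (no nested inductive).
inductive Ch where
  | nil : Ch
  | cons : Char → Bool → Ch → Ch → Ch   -- key, child.is_end, child.children, rest of the dict
deriving Repr

-- a TrieNode: (children, is_end)
abbrev TrieNode := Ch × Bool

-- 'ch in node.children' / 'node.children[ch]'
def getChild : Ch → Char → Option TrieNode
  | .nil, _ => none
  | .cons c e k r, d => if c = d then some (k, e) else getChild r d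

-- 'node.children[ch] = u' (overwrite in place, else append — dict insertion order)
def setChild : Ch → Char → TrieNode → Ch
  | .nil, d, u => .cons d u.2 u.1 .nil
  | .cons c e k r, d, u => if c = d then .cons c u.2 u.1 r else .cons c e k (setChild r d u)

-- _insert: walk str(key); missing child → fresh TrieNode(); mark final node is_end
def insertGo : TrieNode → List Char → TrieNode
  | (ch, _), [] => (ch, true)
  | (ch, e), c :: cs =>
      (setChild ch c (insertGo ((getChild ch c).getD (Ch.nil, false)) cs), e)

-- _search: walk str(key); missing child → False; else final node.is_end
def searchGo : TrieNode → List Char → Bool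
  | (_, e), [] => e
  | (ch, _), c :: cs =>
      match getChild ch c with
      | none => false
      | some t => searchGo t cs

def trie_insert_search (arr : List Int) : Int :=
  let n : Int := PySem.List.len arr
  let mid : Int := PySem.Int.floordiv n 2
  let root0 : TrieNode := (Ch.nil, false)
  let root : TrieNode :=
    (PySem.List.pyRange 0 mid 1).foldl
      (fun r i => insertGo r (PySem.Int.toChars (PySem.List.pyGetD arr i 0))) root0
  (PySem.List.pyRange mid n 1).foldl
    (fun count i =>
      if searchGo root (PySem.Int.toChars (PySem.List.pyGetD arr i 0)) then count + 1 else count) 0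

-- ===== PORT B =====
def trie_insert_search_alt (arr : List Int) : Int :=
  let mid : Int := PySem.Int.floordiv (PySem.List.len arr) 2
  let first : PySem.Set Int := PySem.Set.ofList (PySem.List.slice arr none (some mid))
  ((PySem.List.slice arr (some mid) none).map
    (fun x => if PySem.Set.contains first x then (1 : Int) else 0)).sum

-- ===== PRECONDITION & SPEC =====
def Spec_trie_insert_search (arr : List Int) (out : Int) : Prop := out = trie_insert_search_alt arr
instance (arr : List Int) (out : Int) : Decidable (Spec_trie_insert_search arr out) := by unfold Spec_trie_insert_search; infer_instance

-- ===== CLAIM (what is proved, stated in full; the proofs are below) =====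
def Claim_equal_trie_insert_search : Prop := ∀ (arr : List Int), Dom_trie_insert_search arr → Spec_trie_insert_search arr (trie_insert_search arr)

-- ===== LEMMAS AND PROOFS =====

-- str(n) round-trip: fold the decimal chars back to the number
def pvStep (v : Nat) (c : Char) : Nat := v * 10 + (c.toNat - 48)

theorem pvDigitChar_val (d : Nat) (h : d < 10) :
    (Nat.digitChar d).toNat - 48 = d ∧ Nat.digitChar d ≠ '-' := by
  interval_cases d <;> exact ⟨by decide, by decide⟩

theorem pvCore (f : Nat) : ∀ (n : Nat) (acc : List Char), n < f →
    (Nat.toDigitsCore 10 f n acc).foldl pvStep 0 = acc.foldl pvStep n ∧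
    ∃ d t, d < 10 ∧ Nat.toDigitsCore 10 f n acc = Nat.digitChar d :: t := by
  induction f with
  | zero => intro n acc h; omega
  | succ f ih =>
    intro n acc h
    rw [Nat.toDigitsCore]
    by_cases h0 : n / 10 = 0
    · simp only [h0, if_true]
      have hn : n < 10 := by omega
      constructor
      · simp only [List.foldl_cons, pvStep, (pvDigitChar_val (n % 10) (Nat.mod_lt _ (by omega))).1]
        have : n % 10 = n := Nat.mod_eq_of_lt hn
        rw [this]
        simp
      · exact ⟨n % 10, acc, Nat.mod_lt _ (by omega), rfl⟩
    · simp only [h0, if_false]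
      have h10 : 10 ≤ n := by
        by_contra hc
        exact h0 (Nat.div_eq_of_lt (by omega))
      have hlt : n / 10 < f := by
        have := Nat.div_lt_self (by omega : 0 < n) (by omega : 1 < 10)
        omega
      obtain ⟨hfold, hd⟩ := ih (n / 10) (Nat.digitChar (n % 10) :: acc) hlt
      refine ⟨?_, hd⟩
      rw [hfold]
      simp only [List.foldl_cons, pvStep, (pvDigitChar_val (n % 10) (Nat.mod_lt _ (by omega))).1]
      have : n / 10 * 10 + n % 10 = n := by omega
      rw [this]

theorem pvToDigits_fold (n : Nat) : (Nat.toDigits 10 n).foldl pvStep 0 = n := by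
  have := (pvCore (n + 1) n [] (by omega)).1
  simpa [Nat.toDigits] using this

theorem pvToDigits_head (n : Nat) :
    ∃ d t, d < 10 ∧ Nat.toDigits 10 n = Nat.digitChar d :: t :=
  (pvCore (n + 1) n [] (by omega)).2

theorem pvToDigits_inj {a b : Nat} (h : Nat.toDigits 10 a = Nat.toDigits 10 b) : a = b := by
  have ha := pvToDigits_fold a
  have hb := pvToDigits_fold b
  rw [h] at ha; omega

theorem pvToChars_inj {a b : Int} (h : PySem.Int.toChars a = PySem.Int.toChars b) : a = b := by
  unfold PySem.Int.toChars at h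
  by_cases ha : a < 0 <;> by_cases hb : b < 0 <;> simp only [ha, hb, if_true, if_false] at h
  · injection h with _ h2
    have := pvToDigits_inj h2
    omega
  · obtain ⟨d, t, hd, he⟩ := pvToDigits_head b.toNat
    rw [he] at h
    injection h with h1 _
    exact absurd h1.symm (pvDigitChar_val d hd).2
  · obtain ⟨d, t, hd, he⟩ := pvToDigits_head a.toNat
    rw [he] at h
    injection h.symm with h1 _
    exact absurd h1.symm (pvDigitChar_val d hd).2
  · have := pvToDigits_inj h
    omega

-- trie facts
theorem searchGo_empty (x : List Char) : searchGo (Ch.nil, false) x = false := by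
  cases x <;> simp [searchGo, getChild]

theorem getChild_setChild (ch : Ch) (c d : Char) (u : TrieNode) :
    getChild (setChild ch c u) d = if c = d then some u else getChild ch d := by
  induction ch with
  | nil => by_cases h : c = d <;> simp [setChild, getChild, h]
  | cons c' e k r ihk ihr =>
    by_cases h : c' = c
    · subst h
      by_cases h2 : c' = d <;> simp [setChild, getChild, h2]
    · by_cases h2 : c = d
      · subst h2
        simp [setChild, getChild, h, ihr]
      · simp only [setChild, if_neg h, getChild, ihr]
        by_cases h3 : c' = d <;> simp [h3, h2]

theorem searchGo_insertGo (s : List Char) : ∀ (t : TrieNode) (x : List Char),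
    searchGo (insertGo t s) x = (decide (x = s) || searchGo t x) := by
  induction s with
  | nil =>
    intro t x
    obtain ⟨ch, e⟩ := t
    cases x with
    | nil => simp [insertGo, searchGo]
    | cons c cs => simp [insertGo, searchGo]
  | cons c cs ih =>
    intro t x
    obtain ⟨ch, e⟩ := t
    cases x with
    | nil => simp [insertGo, searchGo]
    | cons d ds =>
      simp only [insertGo, searchGo, getChild_setChild]
      by_cases h : c = d
      · subst h
        simp only [if_true, ih]
        cases hg : getChild ch c with
        | none => simp [searchGo_empty]
        | some t' => simp
      · have hne : ¬ (d :: ds = c :: cs) := by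
          intro he
          injection he with h1 _
          exact h h1.symm
        rw [if_neg h, decide_eq_false hne]
        simp

theorem searchGo_foldl (l : List (List Char)) : ∀ (t : TrieNode) (x : List Char),
    searchGo (l.foldl insertGo t) x = (l.any (fun s => decide (x = s)) || searchGo t x) := by
  induction l with
  | nil => intro t x; simp
  | cons s rest ih =>
    intro t x
    simp only [List.foldl_cons, ih, searchGo_insertGo, List.any_cons]
    cases decide (x = s) <;> simp

theorem searchGo_built (ys : List Int) (x : Int) :
    searchGo (ys.foldl (fun r y => insertGo r (PySem.Int.toChars y)) ((Ch.nil, false) : TrieNode))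
      (PySem.Int.toChars x) = decide (x ∈ ys) := by
  have h1 : ys.foldl (fun r y => insertGo r (PySem.Int.toChars y)) ((Ch.nil, false) : TrieNode)
      = (ys.map PySem.Int.toChars).foldl insertGo ((Ch.nil, false) : TrieNode) := by
    rw [List.foldl_map]
  rw [h1, searchGo_foldl, searchGo_empty, Bool.or_false]
  simp only [List.any_map, Function.comp_def]
  cases hm : decide (x ∈ ys) with
  | true =>
    simp only [decide_eq_true_eq] at hm
    exact List.any_eq_true.mpr ⟨x, hm, by simp⟩
  | false =>
    simp only [decide_eq_false_iff_not] at hm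
    refine List.any_eq_false.mpr ?_
    intro y hy
    simp only [decide_eq_true_eq]
    intro he
    exact hm (pvToChars_inj he.symm ▸ hy)

-- ===== VERDICT (by name: the statement is the Claim_ definition above) =====
theorem trie_insert_search_spec : Claim_equal_trie_insert_search := by
  intro arr _
  unfold Spec_trie_insert_search trie_insert_search trie_insert_search_alt
  dsimp only
  set m : Nat := arr.length / 2 with hm
  have hmle : m ≤ arr.length := Nat.div_le_self _ _
  have hmid : PySem.Int.floordiv (PySem.List.len arr) 2 = (m : Int) := by
    rw [show PySem.List.len arr = ((arr.length : Int)) from by simp [PySem.List.len]]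
    exact_mod_cast PySem.Int.floordiv_natCast arr.length 2
  rw [hmid]
  -- first loop builds the trie from arr.take m
  have hlen_take : (arr.take m).length = m := List.length_take_of_le hmle
  have hloop1 :
      (PySem.List.pyRange 0 (m : Int) 1).foldl
        (fun r i => insertGo r (PySem.Int.toChars (PySem.List.pyGetD arr i 0)))
        ((Ch.nil, false) : TrieNode)
      = (arr.take m).foldl (fun r x => insertGo r (PySem.Int.toChars x)) ((Ch.nil, false) : TrieNode) := by
    have hcong : (PySem.List.pyRange 0 (m : Int) 1).foldl
        (fun r i => insertGo r (PySem.Int.toChars (PySem.List.pyGetD arr i 0)))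
        ((Ch.nil, false) : TrieNode)
      = (PySem.List.pyRange 0 (m : Int) 1).foldl
        (fun r i => insertGo r (PySem.Int.toChars (PySem.List.pyGetD (arr.take m) i 0)))
        ((Ch.nil, false) : TrieNode) := by
      apply PySem.List.foldl_congr_mem
      intro acc i hi
      have hib := (PySem.List.mem_pyRange_one).mp hi
      have h0 : 0 ≤ i := hib.1
      have hnat : i.toNat < m := by omega
      have hg : PySem.List.pyGetD arr i 0 = PySem.List.pyGetD (arr.take m) i 0 := by
        rw [PySem.List.pyGetD_of_nonneg _ _ h0, PySem.List.pyGetD_of_nonneg _ _ h0]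
        rw [List.getD_eq_getElem?_getD, List.getD_eq_getElem?_getD]
        rw [List.getElem?_take_of_lt hnat]
      rw [hg]
    rw [hcong]
    have hl : (m : Int) = PySem.List.len (arr.take m) := by simp [PySem.List.len, hlen_take]
    rw [hl]
    have := PySem.List.foldl_pyRange_pyGetD (arr.take m) 0
      (fun r x => insertGo r (PySem.Int.toChars x)) ((Ch.nil, false) : TrieNode)
      (le_refl (0 : Int))
    simpa using this
  rw [hloop1]
  -- second loop counts over arr.drop m
  have hloop2 :
      (PySem.List.pyRange (m : Int) (PySem.List.len arr) 1).foldl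
        (fun count i =>
          if searchGo ((arr.take m).foldl (fun r x => insertGo r (PySem.Int.toChars x)) ((Ch.nil, false) : TrieNode))
              (PySem.Int.toChars (PySem.List.pyGetD arr i 0)) then count + 1 else count) (0 : Int)
      = (arr.drop m).foldl
        (fun count x =>
          if searchGo ((arr.take m).foldl (fun r y => insertGo r (PySem.Int.toChars y)) ((Ch.nil, false) : TrieNode))
              (PySem.Int.toChars x) then count + 1 else count) (0 : Int) := by
    have := PySem.List.foldl_pyRange_pyGetD arr 0
      (fun count x =>
        if searchGo ((arr.take m).foldl (fun r y => insertGo r (PySem.Int.toChars y)) ((Ch.nil, false) : TrieNode))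
            (PySem.Int.toChars x) then count + 1 else count) (0 : Int)
      (by exact_mod_cast Nat.zero_le m : (0 : Int) ≤ (m : Int))
    simpa using this
  refine Eq.trans hloop2 ?_
  rw [PySem.List.foldl_count_if
    (fun x => searchGo ((arr.take m).foldl (fun r y => insertGo r (PySem.Int.toChars y)) ((Ch.nil, false) : TrieNode))
      (PySem.Int.toChars x)) (arr.drop m) 0]
  -- B side
  have hsl1 : PySem.List.slice arr none (some (m : Int)) = arr.take m := by
    rw [PySem.List.slice_to arr (by exact_mod_cast Nat.zero_le m)]
    simp
  have hsl2 : PySem.List.slice arr (some (m : Int)) none = arr.drop m := by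
    rw [PySem.List.slice_from arr (by exact_mod_cast Nat.zero_le m)]
    simp
  rw [hsl1, hsl2]
  rw [PySem.List.sum_map_ite_one_zero, zero_add]
  congr 1
  apply List.countP_congr
  intro x _
  rw [searchGo_built]
  simp [pysem]
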